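-- pv_equiv track=rewrite | github.com/dodogcat/judge_server | shell.py | rmNumThenTab
-- ===== SOURCE A (Python) =====
-- def rmNumThenTab(line:str):
--     cutted = ""
--
--     rmDigit = True
--     rmTab = True
--     for i in range(len(line)):
--         if((line[i].isdigit() == True) and (rmDigit == True)):
--             continue
--         if((line[i] == '\t') and (rmTab == True)):
--             rmDigit = False
--             continue
--         rmDigit = False
--         rmTab = False
--         cutted += line[i]
--
--     return cutted
-- ===== SOURCE B (Python) =====
-- def rmNumThenTab(line: str):
--     i = 0
--     n = len(line)
--     while i < n and line[i].isdigit():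
--         i += 1
--     while i < n and line[i] == '\t':
--         i += 1
--     return line[i:]
-- ===== Notes on version B (the rewrite author's own statement) =====
-- stated objective: simpler
-- what changed: Replaced the single flag-driven char-by-char accumulating loop by two sequential index scans (skip leading digits, then leading tabs) followed by one slice of the input.
import Mathlib
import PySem

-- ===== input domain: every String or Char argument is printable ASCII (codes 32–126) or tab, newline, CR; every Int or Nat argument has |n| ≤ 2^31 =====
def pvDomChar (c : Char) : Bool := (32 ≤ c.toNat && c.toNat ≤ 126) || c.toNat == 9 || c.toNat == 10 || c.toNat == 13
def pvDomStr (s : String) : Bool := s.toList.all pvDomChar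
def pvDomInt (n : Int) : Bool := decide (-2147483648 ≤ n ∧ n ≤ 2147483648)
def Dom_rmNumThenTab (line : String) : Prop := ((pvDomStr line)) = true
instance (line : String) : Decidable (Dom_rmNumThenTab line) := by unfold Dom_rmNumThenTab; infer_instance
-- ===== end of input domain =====

-- B replaces A's single flag-driven accumulating loop by two sequential scans (skip
-- leading digits, then leading tabs) and a final slice; objective: simpler.

-- ===== PORT A =====
-- A's loop state: (rmDigit, rmTab, cutted); one step per character, branches in A's order.
def rmNumThenTabStep (st : Bool × Bool × List Char) (c : Char) : Bool × Bool × List Char :=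
  let (rmDigit, rmTab, cutted) := st
  if PySem.Chars.isdigit c && rmDigit then (rmDigit, rmTab, cutted)
  else if c == '\t' && rmTab then (false, rmTab, cutted)
  else (false, false, cutted ++ [c])

def rmNumThenTab (line : String) : String :=
  String.mk (line.toList.foldl rmNumThenTabStep (true, true, [])).2.2

-- ===== PORT B =====
-- first while-loop of Source B: advance past leading digits (index scan ↦ structural recursion)
def rmNumThenTabSkipDigits : List Char → List Char
  | [] => []
  | c :: cs => if PySem.Chars.isdigit c then rmNumThenTabSkipDigits cs else c :: cs

-- second while-loop of Source B: advance past leading tabs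
def rmNumThenTabSkipTabs : List Char → List Char
  | [] => []
  | c :: cs => if c == '\t' then rmNumThenTabSkipTabs cs else c :: cs

def rmNumThenTab_alt (line : String) : String :=
  String.mk (rmNumThenTabSkipTabs (rmNumThenTabSkipDigits line.toList))

-- ===== PRECONDITION & SPEC =====
def Spec_rmNumThenTab (line : String) (out : String) : Prop := out = rmNumThenTab_alt line
instance (line : String) (out : String) : Decidable (Spec_rmNumThenTab line out) := by unfold Spec_rmNumThenTab; infer_instance

-- ===== CLAIM (what is proved, stated in full; the proofs are below) =====
def Claim_equal_rmNumThenTab : Prop := ∀ (line : String), Dom_rmNumThenTab line → Spec_rmNumThenTab line (rmNumThenTab line)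

-- ===== LEMMAS AND PROOFS =====

-- A's loop in state (false,false,acc) just appends the rest.
theorem rmNumThenTab_foldl_ff (cs : List Char) (acc : List Char) :
    cs.foldl rmNumThenTabStep (false, false, acc) = (false, false, acc ++ cs) := by
  induction cs generalizing acc with
  | nil => simp
  | cons c cs ih =>
    simp only [List.foldl_cons, rmNumThenTabStep]
    simp [ih]

-- A's loop in state (false,true,acc) produces acc ++ (rest with leading tabs stripped).
theorem rmNumThenTab_foldl_ft (cs : List Char) (acc : List Char) :
    (cs.foldl rmNumThenTabStep (false, true, acc)).2.2 = acc ++ rmNumThenTabSkipTabs cs := by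
  induction cs generalizing acc with
  | nil => simp [rmNumThenTabSkipTabs]
  | cons c cs ih =>
    by_cases ht : c = '\t'
    · subst ht
      simp [rmNumThenTabStep, rmNumThenTabSkipTabs, ih]
    · simp [rmNumThenTabStep, rmNumThenTabSkipTabs, ht, rmNumThenTab_foldl_ff]

-- A's loop from the initial state strips leading digits, then leading tabs.
theorem rmNumThenTab_foldl_tt (cs : List Char) (acc : List Char) :
    (cs.foldl rmNumThenTabStep (true, true, acc)).2.2 =
      acc ++ rmNumThenTabSkipTabs (rmNumThenTabSkipDigits cs) := by
  induction cs generalizing acc with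
  | nil => simp [rmNumThenTabSkipDigits, rmNumThenTabSkipTabs]
  | cons c cs ih =>
    by_cases hd : PySem.Chars.isdigit c = true
    · simp [rmNumThenTabStep, rmNumThenTabSkipDigits, hd, ih]
    · by_cases ht : c = '\t'
      · subst ht
        simp [rmNumThenTabStep, rmNumThenTabSkipDigits, rmNumThenTabSkipTabs, hd,
          rmNumThenTab_foldl_ft]
      · simp [rmNumThenTabStep, rmNumThenTabSkipDigits, rmNumThenTabSkipTabs, hd, ht,
          rmNumThenTab_foldl_ff]

-- ===== VERDICT (by name: the statement is the Claim_ definition above) =====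
theorem rmNumThenTab_spec : Claim_equal_rmNumThenTab := by
  intro line _
  unfold Spec_rmNumThenTab rmNumThenTab rmNumThenTab_alt
  rw [rmNumThenTab_foldl_tt]
  simp
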